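-- pv_equiv track=rewrite | github.com/feliciatrinh/coding-challenges-and-review | ibm/perfect_team.py | perfect_teams
-- ===== SOURCE A (Python) =====
-- def perfect_teams(skills):
--     """
--     Runtime: O(N), Space: O(N)
--     """
--     freq = {}
--     for skill in skills:
--         if skill in freq:
--             freq[skill] += 1
--         else:
--             freq[skill] = 1
--
--     # we don't have all 5 skills so we cannot form a team
--     if len(freq) < 5:
--         return 0
--
--     num_teams = len(skills)
--     for count in freq.values():
--         num_teams = min(num_teams, count)
--     return num_teams
-- ===== SOURCE B (Python) =====
-- def perfect_teams(skills):
--     """Sort a copy, then one grouped scan over runs of equal values."""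
--     s = sorted(skills)
--     runs = []
--     i = 0
--     n = len(s)
--     while i < n:
--         j = i
--         while j < n and s[j] == s[i]:
--             j += 1
--         runs.append(j - i)
--         i = j
--     if len(runs) < 5:
--         return 0
--     return min(runs)
-- ===== Notes on version B (the rewrite author's own statement) =====
-- stated objective: alternative
-- what changed: Replaces the hash-map frequency counter with a sort-then-grouped-scan: sort a copy, walk it once collecting run lengths of equal values, then guard on the number of runs and take the minimum run length.
import Mathlib
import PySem

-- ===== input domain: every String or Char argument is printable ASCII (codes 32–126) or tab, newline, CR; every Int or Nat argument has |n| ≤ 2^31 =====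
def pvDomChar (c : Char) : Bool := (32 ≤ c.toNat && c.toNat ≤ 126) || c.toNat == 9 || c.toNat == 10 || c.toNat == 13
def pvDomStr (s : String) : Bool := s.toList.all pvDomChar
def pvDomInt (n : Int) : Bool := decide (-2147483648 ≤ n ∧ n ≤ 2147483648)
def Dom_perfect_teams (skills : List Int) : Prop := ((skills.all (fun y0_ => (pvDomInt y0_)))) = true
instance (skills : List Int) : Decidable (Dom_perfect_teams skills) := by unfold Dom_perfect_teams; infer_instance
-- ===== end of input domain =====

-- B replaces A's hash-map frequency count by sorting a copy and scanning runs of equal values once; same result, alternative algorithm (not claimed faster).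

-- ===== PORT A =====
def perfect_teams (skills : List Int) : Int :=
  let freq := skills.foldl (fun d skill =>
      if d.contains skill then d.insert skill (d.getD skill 0 + 1)
      else d.insert skill 1) (PySem.Dict.empty : PySem.Dict Int Int)
  if freq.size < 5 then 0
  else freq.values.foldl (fun num_teams count => min num_teams count) (skills.length : Int)

-- ===== PORT B =====
-- inner while loop of Source B: consume the leading run equal to x, return (its length, the rest)
def pvPeel (x : Int) : List Int → Int × List Int
  | [] => (0, [])
  | y :: t => if y = x then let p := pvPeel x t; (p.1 + 1, p.2) else (0, y :: t)

theorem pvPeel_len_le (x : Int) : ∀ t : List Int, (pvPeel x t).2.length ≤ t.length := by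
  intro t
  induction t with
  | nil => simp [pvPeel]
  | cons y t ih =>
    by_cases h : y = x
    · simp [pvPeel, h]; omega
    · simp [pvPeel, h]

-- outer while loop of Source B: list of run lengths of the (sorted) list
def pvRuns : List Int → List Int
  | [] => []
  | x :: t => ((pvPeel x t).1 + 1) :: pvRuns (pvPeel x t).2
  termination_by l => l.length
  decreasing_by
    have := pvPeel_len_le x t
    simp only [List.length_cons]
    omega

def perfect_teams_alt (skills : List Int) : Int :=
  let s := PySem.List.sorted skills (fun z => z) false
  let runs := pvRuns s
  if runs.length < 5 then 0
  else match PySem.List.min? runs (fun z => z) with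
       | some m => m
       | none => 0   -- unreachable: runs is nonempty here

-- ===== PRECONDITION & SPEC =====
def Spec_perfect_teams (skills : List Int) (out : Int) : Prop := out = perfect_teams_alt skills
instance (skills : List Int) (out : Int) : Decidable (Spec_perfect_teams skills out) := by unfold Spec_perfect_teams; infer_instance

-- ===== CLAIM (what is proved, stated in full; the proofs are below) =====
def Claim_equal_perfect_teams : Prop := ∀ (skills : List Int), Dom_perfect_teams skills → Spec_perfect_teams skills (perfect_teams skills)

-- ===== LEMMAS AND PROOFS =====

-- A's loop body is exactly the counter step
theorem pvA_fold_eq_counter (skills : List Int) :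
    skills.foldl (fun d skill =>
      if d.contains skill then d.insert skill (d.getD skill 0 + 1)
      else d.insert skill 1) (PySem.Dict.empty : PySem.Dict Int Int)
    = PySem.Dict.counter skills := by
  have hf : (fun (d : PySem.Dict Int Int) (skill : Int) =>
      if d.contains skill then d.insert skill (d.getD skill 0 + 1)
      else d.insert skill 1)
      = (fun d x => d.modify x 0 (· + 1)) := by
    funext d x
    by_cases h : d.contains x
    · simp [h, PySem.Dict.modify, PySem.Dict.getD_eq_get?_getD]
    · have hg : d.get? x = none := by
        rw [PySem.Dict.get?_eq_none_iff_contains]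
        simpa using h
      simp [h, PySem.Dict.modify, PySem.Dict.getD_eq_get?_getD, hg]
  rw [hf, PySem.Dict.counter_eq_foldl]

-- pvPeel computes takeWhile-length and dropWhile
theorem pvPeel_eq (x : Int) (t : List Int) :
    pvPeel x t = (((t.takeWhile (fun y => y == x)).length : Int), t.dropWhile (fun y => y == x)) := by
  induction t with
  | nil => simp [pvPeel]
  | cons y t ih =>
    by_cases h : y = x
    · simp [pvPeel, h, ih]
    · simp [pvPeel, h]

theorem pv_set_add_mem (s : List Int) (y : Int) (h : y ∈ s) : PySem.Set.add s y = s := by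
  simp [PySem.Set.add, h]

theorem pv_foldl_add_mem (w : List Int) : ∀ s : List Int, (∀ y ∈ w, y ∈ s) →
    List.foldl PySem.Set.add s w = s := by
  induction w with
  | nil => intro s _; rfl
  | cons y w ih =>
    intro s h
    rw [List.foldl_cons, pv_set_add_mem s y (h y (List.mem_cons_self))]
    exact ih s (fun z hz => h z (List.mem_cons_of_mem _ hz))

theorem pv_set_add_cons (s : List Int) (x y : Int) (h : y ≠ x) :
    PySem.Set.add (x :: s) y = x :: PySem.Set.add s y := by
  have hc : (x :: s).contains y = s.contains y := by simp [h]
  simp only [PySem.Set.add, PySem.Set.contains, hc]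
  split <;> simp

theorem pv_foldl_add_cons (r : List Int) (x : Int) (hx : x ∉ r) : ∀ s : List Int,
    List.foldl PySem.Set.add (x :: s) r = x :: List.foldl PySem.Set.add s r := by
  induction r with
  | nil => intro s; rfl
  | cons y r ih =>
    intro s
    have hyx : y ≠ x := fun h => hx (h ▸ List.mem_cons_self)
    rw [List.foldl_cons, List.foldl_cons, pv_set_add_cons s x y hyx]
    exact ih (fun h => hx (List.mem_cons_of_mem _ h)) _

-- set(x :: t) where t = (run of x) ++ r with x ∉ r
theorem pv_ofList_cons_run (x : Int) (t : List Int)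
    (hxr : x ∉ t.dropWhile (fun y => y == x)) :
    PySem.Set.ofList (x :: t) = x :: PySem.Set.ofList (t.dropWhile (fun y => y == x)) := by
  have h1 : PySem.Set.ofList (x :: t) = List.foldl PySem.Set.add [x] t := by
    rw [PySem.Set.ofList_eq_foldl]
    rfl
  rw [h1]
  conv_lhs => rw [← List.takeWhile_append_dropWhile (p := fun y => y == x) (l := t)]
  rw [List.foldl_append]
  have h2 : List.foldl PySem.Set.add [x] (t.takeWhile (fun y => y == x)) = [x] := by
    apply pv_foldl_add_mem
    intro y hy
    have := List.mem_takeWhile_imp hy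
    simp at this
    simp [this]
  rw [h2, pv_foldl_add_cons _ x hxr [], PySem.Set.ofList_eq_foldl]

-- after a sorted run of x, everything is strictly greater
theorem pv_dropWhile_gt (x : Int) (t : List Int) (hs : (x :: t).Pairwise (· ≤ ·)) :
    ∀ y ∈ t.dropWhile (fun y => y == x), x < y := by
  have hx : ∀ y ∈ t, x ≤ y := (List.pairwise_cons.mp hs).1
  have ht : t.Pairwise (· ≤ ·) := (List.pairwise_cons.mp hs).2
  have hr : (t.dropWhile (fun y => y == x)).Pairwise (· ≤ ·) :=
    ht.sublist (List.dropWhile_sublist _)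
  intro y hy
  rcases hcr : t.dropWhile (fun y => y == x) with _ | ⟨h0, rt⟩
  · rw [hcr] at hy; simp at hy
  · have hh : (h0 == x) = false := by
      have h := List.head?_dropWhile_not (fun y => y == x) t
      rw [hcr] at h
      simpa using h
    have hh' : h0 ≠ x := by simpa using hh
    have hxh : x ≤ h0 := hx h0 ((List.dropWhile_sublist _).subset (by rw [hcr]; exact List.mem_cons_self))
    have hxlt : x < h0 := lt_of_le_of_ne hxh (Ne.symm hh')
    rw [hcr] at hy
    rcases List.mem_cons.mp hy with rfl | hy'
    · exact hxlt
    · have : h0 ≤ y := by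
        rw [hcr] at hr
        exact (List.pairwise_cons.mp hr).1 y hy'
      omega

-- runs of a sorted list are the counts of its distinct values in first-occurrence order
theorem pvRuns_sorted_aux : ∀ (n : Nat) (s : List Int), s.length ≤ n → s.Pairwise (· ≤ ·) →
    pvRuns s = (PySem.Set.ofList s).map (fun k => (s.count k : Int)) := by
  intro n
  induction n with
  | zero =>
    intro s hl _
    have : s = [] := List.eq_nil_of_length_eq_zero (Nat.le_zero.mp hl)
    subst this
    simp [pvRuns, PySem.Set.ofList_eq_foldl]
  | succ n ih =>
    intro s hl hs
    match s with
    | [] => simp [pvRuns, PySem.Set.ofList_eq_foldl]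
    | x :: t =>
      have hgt : ∀ y ∈ t.dropWhile (fun y => y == x), x < y := pv_dropWhile_gt x t hs
      have hxr : x ∉ t.dropWhile (fun y => y == x) := fun h => absurd (hgt x h) (lt_irrefl x)
      have hw : ∀ y ∈ t.takeWhile (fun y => y == x), y = x := by
        intro y hy
        have := List.mem_takeWhile_imp hy
        simpa using this
      have ht : t.Pairwise (· ≤ ·) := (List.pairwise_cons.mp hs).2
      have hrp : (t.dropWhile (fun y => y == x)).Pairwise (· ≤ ·) :=
        ht.sublist (List.dropWhile_sublist _)
      have hrl : (t.dropWhile (fun y => y == x)).length ≤ n := by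
        have h1 := List.length_dropWhile_le (p := fun y => y == x) (l := t)
        simp only [List.length_cons] at hl
        omega
      rw [pvRuns, pvPeel_eq, pv_ofList_cons_run x t hxr, List.map_cons]
      have hsplit := List.takeWhile_append_dropWhile (p := fun y => y == x) (l := t)
      have hcw : (t.takeWhile (fun y => y == x)).count x = (t.takeWhile (fun y => y == x)).length := by
        rw [List.count_eq_length]
        intro b hb
        simp [hw b hb]
      have hcr0 : (t.dropWhile (fun y => y == x)).count x = 0 :=
        List.count_eq_zero.mpr hxr
      have hcount : (x :: t).count x = (t.takeWhile (fun y => y == x)).length + 1 := by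
        have hct : t.count x = (t.takeWhile (fun y => y == x)).count x
            + (t.dropWhile (fun y => y == x)).count x := by
          conv_lhs => rw [← hsplit]
          rw [List.count_append]
        rw [List.count_cons_self, hct, hcw, hcr0]
      congr 1
      · rw [hcount]
        push_cast
        ring
      · rw [ih _ hrl hrp]
        apply List.map_congr_left
        intro k hk
        have hkr : k ∈ t.dropWhile (fun y => y == x) := (PySem.Set.mem_ofList _ _).mp hk
        have hkx : k ≠ x := fun h => absurd (hgt k hkr) (by rw [h]; exact lt_irrefl x)
        have h1 : (x :: t).count k = t.count k := by
          rw [List.count_cons]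
          simp [Ne.symm hkx]
        have h2 : t.count k = (t.dropWhile (fun y => y == x)).count k := by
          have h3 : (t.takeWhile (fun y => y == x)).count k = 0 := by
            rw [List.count_eq_zero]
            intro hkw
            exact hkx (hw k hkw)
          conv_lhs => rw [← hsplit]
          rw [List.count_append, h3, Nat.zero_add]
        rw [h1, h2]

theorem pvRuns_sorted (s : List Int) (hs : s.Pairwise (· ≤ ·)) :
    pvRuns s = (PySem.Set.ofList s).map (fun k => (s.count k : Int)) :=
  pvRuns_sorted_aux s.length s (le_refl _) hs

theorem pv_foldl_min_start (t : List Int) : ∀ (a x : Int),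
    t.foldl min (min a x) = min a (t.foldl min x) := by
  induction t with
  | nil => intro a x; rfl
  | cons y t ih =>
    intro a x
    rw [List.foldl_cons, List.foldl_cons, min_assoc, ih]

-- ===== VERDICT (by name: the statement is the Claim_ definition above) =====
theorem perfect_teams_spec : Claim_equal_perfect_teams := by
  intro skills _
  unfold Spec_perfect_teams perfect_teams perfect_teams_alt
  rw [pvA_fold_eq_counter]
  have hperm : (PySem.List.sorted skills (fun z => z) false).Perm skills :=
    PySem.List.sorted_perm skills (fun z => z) false
  have hpair : (PySem.List.sorted skills (fun z => z) false).Pairwise (· ≤ ·) :=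
    PySem.List.sorted_pairwise skills (fun z => z)
  set s := PySem.List.sorted skills (fun z => z) false with hsdef
  have hruns : pvRuns s = (PySem.Set.ofList s).map (fun k => (skills.count k : Int)) := by
    rw [pvRuns_sorted s hpair]
    exact List.map_congr_left (fun k _ => by rw [hperm.count_eq])
  have hKperm : (PySem.Set.ofList s).Perm (PySem.Set.ofList skills) := by
    rw [List.perm_ext_iff_of_nodup (PySem.Set.nodup_ofList s) (PySem.Set.nodup_ofList skills)]
    intro k
    rw [PySem.Set.mem_ofList, PySem.Set.mem_ofList, hperm.mem_iff]
  have hsize : (PySem.Dict.counter skills).size = (PySem.Set.ofList skills).length := by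
    show (PySem.Dict.counter skills).items.length = _
    rw [PySem.Dict.items_counter]
    exact List.length_map _
  have hvals : (PySem.Dict.counter skills).values
      = (PySem.Set.ofList skills).map (fun k => (skills.count k : Int)) := by
    show (PySem.Dict.counter skills).items.map (·.2) = _
    rw [PySem.Dict.items_counter, List.map_map]
    rfl
  have hlen : (pvRuns s).length = (PySem.Set.ofList skills).length := by
    rw [hruns, List.length_map, hKperm.length_eq]
  by_cases hc : (PySem.Set.ofList skills).length < 5
  · rw [if_pos (by rw [hsize]; exact hc), if_pos (by rw [hlen]; exact hc)]
  · rw [if_neg (by rw [hsize]; exact hc), if_neg (by rw [hlen]; exact hc)]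
    have hvperm : (pvRuns s).Perm ((PySem.Dict.counter skills).values) := by
      rw [hruns, hvals]
      exact hKperm.map _
    rcases hr : pvRuns s with _ | ⟨r0, rt⟩
    · exfalso
      rw [hr] at hlen
      simp at hlen
      omega
    · rw [PySem.List.min?_id_cons]
      have hfold : ((PySem.Dict.counter skills).values).foldl
          (fun num_teams count => min num_teams count) (skills.length : Int)
          = (r0 :: rt).foldl min (skills.length : Int) := by
        show ((PySem.Dict.counter skills).values).foldl min (skills.length : Int) = _
        haveI : RightCommutative (min : Int → Int → Int) := ⟨fun b a₁ a₂ => by omega⟩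
        have h := hvperm.foldl_eq (f := min) (b := (skills.length : Int))
        rw [← hr]
        exact h.symm
      rw [hfold, List.foldl_cons]
      have hr0' : r0 ≤ (skills.length : Int) := by
        have hr0mem : r0 ∈ pvRuns s := by rw [hr]; exact List.mem_cons_self
        rw [hruns] at hr0mem
        rcases List.mem_map.mp hr0mem with ⟨k, _, hk⟩
        rw [← hk]
        exact_mod_cast List.count_le_length
      have hle : rt.foldl min r0 ≤ r0 := (PySem.List.foldl_min_le rt r0).1
      rw [pv_foldl_min_start]
      show min (skills.length : Int) (rt.foldl min r0) = rt.foldl min r0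
      exact min_eq_right (le_trans hle hr0')
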